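-- pv_equiv track=rewrite | github.com/akramahmed1/QuantaEnergi | src/energyopti_pro/services/enhanced_rbac.py | _get_permission_level
-- ===== SOURCE A (Python) =====
-- from typing import Dict, List, Optional, Any, Set
--
-- def _get_permission_level(permissions: Dict[str, List[str]]) -> str:
--     """Get overall permission level"""
--
--     if any("super_admin" in perms for perms in permissions.values()):
--         return "Super Admin"
--     elif any("admin" in perms for perms in permissions.values()):
--         return "Admin"
--     elif any("write" in perms for perms in permissions.values()):
--         return "Write"
--     elif any("read" in perms for perms in permissions.values()):
--         return "Read"
--     else:
--         return "None"
-- ===== SOURCE B (Python) =====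
-- _RANKS = {"super_admin": 4, "admin": 3, "write": 2, "read": 1}
-- _LABELS = ["None", "Read", "Write", "Admin", "Super Admin"]
--
-- def _get_permission_level(permissions):
--     """Get overall permission level"""
--     best = 0
--     for perms in permissions.values():
--         for p in perms:
--             r = _RANKS.get(p, 0)
--             if r > best:
--                 best = r
--     return _LABELS[best]
-- ===== Notes on version B (the rewrite author's own statement) =====
-- stated objective: alternative
-- what changed: Replaces four separate any() scans over the whole dict with a single pass that folds every permission string into a numeric max rank, then maps the rank to its label.
import Mathlib
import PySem

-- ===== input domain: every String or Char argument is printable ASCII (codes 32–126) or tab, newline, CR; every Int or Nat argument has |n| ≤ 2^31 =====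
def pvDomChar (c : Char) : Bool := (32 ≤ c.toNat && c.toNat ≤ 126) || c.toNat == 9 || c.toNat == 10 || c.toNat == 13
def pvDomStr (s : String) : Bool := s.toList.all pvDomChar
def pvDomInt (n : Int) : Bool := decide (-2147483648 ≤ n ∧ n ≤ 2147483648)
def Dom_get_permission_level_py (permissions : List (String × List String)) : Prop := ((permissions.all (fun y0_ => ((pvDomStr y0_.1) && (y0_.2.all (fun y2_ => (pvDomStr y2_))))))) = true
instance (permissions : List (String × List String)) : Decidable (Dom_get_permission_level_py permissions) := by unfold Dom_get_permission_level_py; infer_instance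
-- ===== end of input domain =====

-- B replaces A's four any() scans by one fold to a numeric max rank plus a rank→label map (alternative; same cost).

-- ===== PORT A =====
-- A: four successive any(...) scans over permissions.values(), one per keyword.
def get_permission_level_py (permissions : List (String × List String)) : String :=
  if permissions.any (fun kv => kv.2.any (fun p => p == "super_admin")) then "Super Admin"
  else if permissions.any (fun kv => kv.2.any (fun p => p == "admin")) then "Admin"
  else if permissions.any (fun kv => kv.2.any (fun p => p == "write")) then "Write"
  else if permissions.any (fun kv => kv.2.any (fun p => p == "read")) then "Read"
  else "None"

-- ===== PORT B =====
-- _RANKS.get(p, 0) from Source B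
def rankB (p : String) : Nat :=
  if p = "super_admin" then 4
  else if p = "admin" then 3
  else if p = "write" then 2
  else if p = "read" then 1
  else 0

-- _LABELS[best] from Source B (best is always ≤ 4)
def labelB (best : Nat) : String :=
  ["None", "Read", "Write", "Admin", "Super Admin"].getD best "None"

def get_permission_level_py_alt (permissions : List (String × List String)) : String :=
  labelB (permissions.foldl
    (fun best kv => kv.2.foldl (fun b p => if rankB p > b then rankB p else b) best) 0)

-- ===== PRECONDITION & SPEC =====
def Spec_get_permission_level_py (permissions : List (String × List String)) (out : String) : Prop := out = get_permission_level_py_alt permissions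
instance (permissions : List (String × List String)) (out : String) : Decidable (Spec_get_permission_level_py permissions out) := by unfold Spec_get_permission_level_py; infer_instance

-- ===== CLAIM (what is proved, stated in full; the proofs are below) =====
def Claim_equal_get_permission_level_py : Prop := ∀ (permissions : List (String × List String)), Dom_get_permission_level_py permissions → Spec_get_permission_level_py permissions (get_permission_level_py permissions)

-- ===== LEMMAS AND PROOFS =====

theorem foldl_inner_ge (ps : List String) (a k : Nat) :
    k ≤ ps.foldl (fun b p => if rankB p > b then rankB p else b) a ↔
      k ≤ a ∨ ∃ p ∈ ps, k ≤ rankB p := by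
  induction ps generalizing a with
  | nil => simp
  | cons q qs ih =>
      simp only [List.foldl_cons, ih, List.mem_cons]
      constructor
      · rintro (h | h)
        · split_ifs at h with hq
          · exact Or.inr ⟨q, Or.inl rfl, h⟩
          · exact Or.inl h
        · obtain ⟨p, hp, hk⟩ := h
          exact Or.inr ⟨p, Or.inr hp, hk⟩
      · rintro (h | ⟨p, hp | hp, hk⟩)
        · left; split_ifs with hq
          · omega
          · exact h
        · subst hp; left; split_ifs with hq <;> omega
        · exact Or.inr ⟨p, hp, hk⟩

theorem foldl_outer_ge (l : List (String × List String)) (a k : Nat) :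
    k ≤ l.foldl (fun best kv => kv.2.foldl (fun b p => if rankB p > b then rankB p else b) best) a ↔
      k ≤ a ∨ ∃ kv ∈ l, ∃ p ∈ kv.2, k ≤ rankB p := by
  induction l generalizing a with
  | nil => simp
  | cons kv kvs ih =>
      simp only [List.foldl_cons, ih, foldl_inner_ge, List.mem_cons]
      constructor
      · rintro ((h | ⟨p, hp, hk⟩) | ⟨kv', hkv', h⟩)
        · exact Or.inl h
        · exact Or.inr ⟨kv, Or.inl rfl, p, hp, hk⟩
        · exact Or.inr ⟨kv', Or.inr hkv', h⟩
      · rintro (h | ⟨kv', hkv' | hkv', h⟩)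
        · exact Or.inl (Or.inl h)
        · subst hkv'; exact Or.inl (Or.inr h)
        · exact Or.inr ⟨kv', hkv', h⟩

theorem foldl_inner_le (ps : List String) (a : Nat) (ha : a ≤ 4) :
    ps.foldl (fun b p => if rankB p > b then rankB p else b) a ≤ 4 := by
  induction ps generalizing a with
  | nil => simpa
  | cons q qs ih =>
      simp only [List.foldl_cons]
      apply ih
      have : rankB q ≤ 4 := by unfold rankB; split_ifs <;> omega
      split_ifs <;> omega

theorem foldl_outer_le (l : List (String × List String)) (a : Nat) (ha : a ≤ 4) :
    l.foldl (fun best kv => kv.2.foldl (fun b p => if rankB p > b then rankB p else b) best) a ≤ 4 := by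
  induction l generalizing a with
  | nil => simpa
  | cons kv kvs ih =>
      simp only [List.foldl_cons]
      exact ih _ (foldl_inner_le _ _ ha)

theorem rank_ge_4 (p : String) : 4 ≤ rankB p ↔ p = "super_admin" := by
  unfold rankB; split_ifs <;> simp_all
theorem rank_ge_3 (p : String) : 3 ≤ rankB p ↔ p = "super_admin" ∨ p = "admin" := by
  unfold rankB; split_ifs <;> simp_all
theorem rank_ge_2 (p : String) : 2 ≤ rankB p ↔ p = "super_admin" ∨ p = "admin" ∨ p = "write" := by
  unfold rankB; split_ifs <;> simp_all
theorem rank_ge_1 (p : String) : 1 ≤ rankB p ↔ p = "super_admin" ∨ p = "admin" ∨ p = "write" ∨ p = "read" := by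
  unfold rankB; split_ifs <;> simp_all

-- ===== VERDICT (by name: the statement is the Claim_ definition above) =====
theorem get_permission_level_py_spec : Claim_equal_get_permission_level_py := by
  intro l _
  unfold Spec_get_permission_level_py get_permission_level_py get_permission_level_py_alt
  set m := l.foldl (fun best kv => kv.2.foldl (fun b p => if rankB p > b then rankB p else b) best) 0 with hm
  have hle : m ≤ 4 := foldl_outer_le l 0 (by omega)
  have h4 : 4 ≤ m ↔ ∃ kv ∈ l, ∃ p ∈ kv.2, p = "super_admin" := by
    rw [hm, foldl_outer_ge]; simp [rank_ge_4]
  have h3 : 3 ≤ m ↔ ∃ kv ∈ l, ∃ p ∈ kv.2, p = "super_admin" ∨ p = "admin" := by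
    rw [hm, foldl_outer_ge]; simp [rank_ge_3]
  have h2 : 2 ≤ m ↔ ∃ kv ∈ l, ∃ p ∈ kv.2, p = "super_admin" ∨ p = "admin" ∨ p = "write" := by
    rw [hm, foldl_outer_ge]; simp [rank_ge_2]
  have h1 : 1 ≤ m ↔ ∃ kv ∈ l, ∃ p ∈ kv.2, p = "super_admin" ∨ p = "admin" ∨ p = "write" ∨ p = "read" := by
    rw [hm, foldl_outer_ge]; simp [rank_ge_1]
  clear hm
  simp only [List.any_eq_true, beq_iff_eq]
  split_ifs with hs ha hw hr
  · have : m = 4 := by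
      have := h4.2 (by obtain ⟨kv, hkv, p, hp, he⟩ := hs; exact ⟨kv, hkv, p, hp, he⟩)
      omega
    simp [this, labelB]
  · have : m = 3 := by
      have h3' := h3.2 (by obtain ⟨kv, hkv, p, hp, he⟩ := ha; exact ⟨kv, hkv, p, hp, Or.inr he⟩)
      have h4' : ¬ 4 ≤ m := fun h => hs (h4.1 h)
      omega
    simp [this, labelB]
  · have : m = 2 := by
      have h2' := h2.2 (by obtain ⟨kv, hkv, p, hp, he⟩ := hw; exact ⟨kv, hkv, p, hp, Or.inr (Or.inr he)⟩)
      have h3' : ¬ 3 ≤ m := fun h => by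
        obtain ⟨kv, hkv, p, hp, he | he⟩ := h3.1 h
        · exact hs ⟨kv, hkv, p, hp, he⟩
        · exact ha ⟨kv, hkv, p, hp, he⟩
      omega
    simp [this, labelB]
  · have : m = 1 := by
      have h1' := h1.2 (by obtain ⟨kv, hkv, p, hp, he⟩ := hr; exact ⟨kv, hkv, p, hp, Or.inr (Or.inr (Or.inr he))⟩)
      have h2' : ¬ 2 ≤ m := fun h => by
        obtain ⟨kv, hkv, p, hp, he | he | he⟩ := h2.1 h
        · exact hs ⟨kv, hkv, p, hp, he⟩
        · exact ha ⟨kv, hkv, p, hp, he⟩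
        · exact hw ⟨kv, hkv, p, hp, he⟩
      omega
    simp [this, labelB]
  · have : m = 0 := by
      have h1' : ¬ 1 ≤ m := fun h => by
        obtain ⟨kv, hkv, p, hp, he | he | he | he⟩ := h1.1 h
        · exact hs ⟨kv, hkv, p, hp, he⟩
        · exact ha ⟨kv, hkv, p, hp, he⟩
        · exact hw ⟨kv, hkv, p, hp, he⟩
        · exact hr ⟨kv, hkv, p, hp, he⟩
      omega
    simp [this, labelB]
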